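-- pv_equiv track=rewrite | github.com/mchlebosz/2021AoC | D10/p1.py | cropLine
-- ===== SOURCE A (Python) =====
-- def cropLine(line):
--     closeBrackets = {"{": "}", "[": "]", "(": ")", "<": ">"}
--     s = []
--     for t in line:
--         s.append(t)
--         while len(s) >= 2 and s[-2] in closeBrackets and s[-1] == closeBrackets[s[-2]]:
--             s.pop()
--
--             s.pop()
--     return s
-- ===== SOURCE B (Python) =====
-- def cropLine(line):
--     pairs = {("(", ")"), ("[", "]"), ("{", "}"), ("<", ">")}
--     s = list(line)
--     while True:
--         t = []
--         i = 0
--         while i < len(s):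
--             if i + 1 < len(s) and (s[i], s[i + 1]) in pairs:
--                 i += 2
--             else:
--                 t.append(s[i])
--                 i += 1
--         if t == s:
--             return s
--         s = t
-- ===== Notes on version B (the rewrite author's own statement) =====
-- stated objective: alternative
-- what changed: Replaced the single stack pass (append + while-pop of matching top pairs) by repeated full left-to-right scans that delete non-overlapping adjacent matching bracket pairs until a scan changes nothing; pair-removal is confluent, so the reduced form is the same.
import Mathlib
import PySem

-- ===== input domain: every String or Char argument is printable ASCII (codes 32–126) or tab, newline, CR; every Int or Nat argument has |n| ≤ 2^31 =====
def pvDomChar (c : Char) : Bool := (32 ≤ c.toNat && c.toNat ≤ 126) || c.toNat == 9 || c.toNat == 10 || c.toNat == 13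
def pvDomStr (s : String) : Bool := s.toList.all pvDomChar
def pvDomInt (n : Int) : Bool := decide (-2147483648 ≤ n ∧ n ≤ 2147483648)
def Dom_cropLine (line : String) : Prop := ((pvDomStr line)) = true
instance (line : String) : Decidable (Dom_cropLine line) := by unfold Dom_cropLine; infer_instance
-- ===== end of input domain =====

-- B replaces A's single stack pass by repeated global scans deleting adjacent matching
-- bracket pairs until stable (alternative decomposition; same results, not faster).

-- ===== PORT A =====
-- closeBrackets = {"{": "}", "[": "]", "(": ")", "<": ">"}
def cbDict : PySem.Dict String String :=
  PySem.Dict.ofList [("{", "}"), ("[", "]"), ("(", ")"), ("<", ">")]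

-- the while-condition after the length test: s[-2] in closeBrackets and s[-1] == closeBrackets[s[-2]]
def condOpt : Option String → Option String → Bool
  | some a, some b => (match cbDict.get? a with | some v => b == v | none => false)
  | _, _ => false

-- while len(s) >= 2 and s[-2] in closeBrackets and s[-1] == closeBrackets[s[-2]]: s.pop(); s.pop()
def cropPop (s : List String) : List String :=
  if _h : 2 ≤ s.length ∧ condOpt (PySem.List.pyGet? s (-2)) (PySem.List.pyGet? s (-1)) = true then
    cropPop (s.dropLast.dropLast)
  else s
termination_by s.length
decreasing_by simp [List.length_dropLast]; omega

def cropLine (line : String) : List String :=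
  (line.toList.map (fun c => String.ofList [c])).foldl (fun s t => cropPop (s ++ [t])) []

-- ===== PORT B =====
def pairsB : PySem.Set (String × String) :=
  PySem.Set.ofList [("(", ")"), ("[", "]"), ("{", "}"), ("<", ">")]

-- one left-to-right scan deleting non-overlapping adjacent matching pairs
def cropPass : List String → List String
  | [] => []
  | [a] => [a]
  | a :: b :: t => if pairsB.contains (a, b) then cropPass t else a :: cropPass (b :: t)

theorem cropPass_len_le (s : List String) : (cropPass s).length ≤ s.length := by
  fun_induction cropPass with
  | case1 => exact le_rfl
  | case2 => exact le_rfl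
  | case3 a b t h ih => simp only [List.length_cons]; omega
  | case4 a b t h ih => simp only [List.length_cons] at ih ⊢; omega

theorem cropPass_eq_or_lt (s : List String) :
    cropPass s = s ∨ (cropPass s).length < s.length := by
  fun_induction cropPass with
  | case1 => exact Or.inl rfl
  | case2 => exact Or.inl rfl
  | case3 a b t h ih =>
    right
    have := cropPass_len_le t
    simp only [List.length_cons]
    omega
  | case4 a b t h ih =>
    rcases ih with ih | ih
    · left; rw [ih]
    · right; simp only [List.length_cons] at ih ⊢; omega

-- while True: scan; stop when unchanged
def cropLoop (s : List String) : List String :=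
  let t := cropPass s
  if heq : t = s then s else cropLoop t
termination_by s.length
decreasing_by
  rcases cropPass_eq_or_lt s with h | h
  · exact absurd h heq
  · exact h

def cropLine_alt (line : String) : List String :=
  cropLoop (line.toList.map (fun c => String.ofList [c]))

-- ===== PRECONDITION & SPEC =====
def Spec_cropLine (line : String) (out : List String) : Prop := out = cropLine_alt line
instance (line : String) (out : List String) : Decidable (Spec_cropLine line out) := by unfold Spec_cropLine; infer_instance

-- ===== CLAIM (what is proved, stated in full; the proofs are below) =====
def Claim_equal_cropLine : Prop := ∀ (line : String), Dom_cropLine line → Spec_cropLine line (cropLine line)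

-- ===== LEMMAS AND PROOFS =====

-- canonical matching predicate shared by the two ports' analysis
def isP (a b : String) : Bool :=
  (a == "(" && b == ")") || (a == "[" && b == "]") || (a == "{" && b == "}") || (a == "<" && b == ">")

def NoP (a b : String) : Prop := isP a b = false

theorem decide_eq_beq (x y : String) : decide (x = y) = (x == y) := by
  by_cases h : x = y <;> simp [h]

theorem pairsB_eval : pairsB = [("(", ")"), ("[", "]"), ("{", "}"), ("<", ">")] := by decide

theorem cbDict_eval : cbDict = PySem.Dict.mk [("{", "}"), ("[", "]"), ("(", ")"), ("<", ">")] := by decide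

theorem pairsB_eq (a b : String) : pairsB.contains (a, b) = isP a b := by
  by_cases h1 : a = "(" <;> by_cases h2 : a = "[" <;> by_cases h3 : a = "{" <;> by_cases h4 : a = "<" <;>
    subst_eqs <;>
    simp_all [pairsB_eval, isP, PySem.Set.contains, decide_eq_beq]

theorem condA_eq (a b : String) : condOpt (some a) (some b) = isP a b := by
  simp only [condOpt, cbDict_eval, PySem.Dict.get?_mk_cons, beq_iff_eq]
  split_ifs with h1 h2 h3 h4
  · subst h1; simp [isP]
  · subst h2; simp [isP]
  · subst h3; simp [isP]
  · subst h4; simp [isP]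
  · have n1 : (a == "{") = false := beq_eq_false_iff_ne.mpr (fun h => h1 h.symm)
    have n2 : (a == "[") = false := beq_eq_false_iff_ne.mpr (fun h => h2 h.symm)
    have n3 : (a == "(") = false := beq_eq_false_iff_ne.mpr (fun h => h3 h.symm)
    have n4 : (a == "<") = false := beq_eq_false_iff_ne.mpr (fun h => h4 h.symm)
    simp [isP, PySem.Dict.get?, n1, n2, n3, n4]

-- B's reduction seen through a single canonical stack step (reversed stack)
def push (r : List String) (t : String) : List String :=
  match r with
  | [] => [t]
  | y :: r' => if isP y t then r' else t :: y :: r'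

theorem open_no_pair {a b : String} (h : isP a b = true) (y : String) : isP y a = false := by
  simp only [isP, Bool.or_eq_true, Bool.and_eq_true, beq_iff_eq] at h
  rcases h with ((⟨rfl, -⟩ | ⟨rfl, -⟩) | ⟨rfl, -⟩) | ⟨rfl, -⟩ <;> simp [isP]

theorem push_eq_cons (r : List String) (t : String)
    (h : ∀ y, r.head? = some y → isP y t = false) : push r t = t :: r := by
  cases r with
  | nil => rfl
  | cons y r' => simp [push, h y rfl]

theorem pair_skip {a b : String} (h : isP a b = true) (v : List String) (r : List String) :
    List.foldl push r (a :: b :: v) = List.foldl push r v := by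
  have h1 : push r a = a :: r := push_eq_cons r a (fun y _ => open_no_pair h y)
  have h2 : push (a :: r) b = r := by simp [push, h]
  rw [List.foldl_cons, List.foldl_cons, h1, h2]

theorem pass_fold (s : List String) : ∀ r, List.foldl push r (cropPass s) = List.foldl push r s := by
  fun_induction cropPass with
  | case1 => intro r; rfl
  | case2 a => intro r; rfl
  | case3 a b t h ih =>
    intro r
    rw [ih r, pair_skip (by rw [← pairsB_eq]; exact h) t r]
  | case4 a b t h ih =>
    intro r
    simp only [List.foldl_cons]
    exact ih (push r a)

theorem pass_fix_chain (s : List String) (h : cropPass s = s) : List.IsChain NoP s := by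
  fun_induction cropPass with
  | case1 => exact List.isChain_nil
  | case2 a => exact List.isChain_singleton a
  | case3 a b t hp ih =>
    exfalso
    have hl := cropPass_len_le t
    have := congrArg List.length h
    simp only [List.length_cons] at this
    omega
  | case4 a b t hp ih =>
    simp only [List.cons.injEq] at h
    refine List.isChain_cons_cons.mpr ⟨?_, ih h.2⟩
    unfold NoP
    rw [← pairsB_eq]
    exact eq_false_of_ne_true hp

theorem loop_fix (s : List String) : cropPass (cropLoop s) = cropLoop s := by
  fun_induction cropLoop with
  | case1 s t heq => exact heq
  | case2 s t heq ih => exact ih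

theorem loop_fold (s : List String) : List.foldl push [] (cropLoop s) = List.foldl push [] s := by
  fun_induction cropLoop with
  | case1 s t heq => rfl
  | case2 s t heq ih => rw [ih]; exact pass_fold s []

theorem chain_fold (s : List String) : ∀ r : List String, List.IsChain NoP s →
    (∀ a y, s.head? = some a → r.head? = some y → isP y a = false) →
    List.foldl push r s = s.reverse ++ r := by
  induction s with
  | nil => intro r _ _; simp
  | cons a t ih =>
    intro r hc hh
    have h1 : push r a = a :: r := push_eq_cons r a (fun y hy => hh a y rfl hy)
    simp only [List.foldl_cons, h1]
    rw [ih (a :: r) hc.tail ?side]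
    case side =>
      intro b y hb hy
      simp only [List.head?_cons, Option.some.injEq] at hy
      subst hy
      cases t with
      | nil => simp at hb
      | cons b' t' =>
        simp only [List.head?_cons, Option.some.injEq] at hb
        subst hb
        exact (List.isChain_cons_cons.mp hc).1
    simp

-- ---- A-side: the while loop on an invariant-satisfying stack ----

theorem pyGet_neg_two (u : List String) (a b : String) :
    PySem.List.pyGet? ((u ++ [a]) ++ [b]) (-2) = some a := by
  have h2 : ((-2 : Int)) = -((2 : Nat) : Int) := by norm_num
  rw [h2, PySem.List.pyGet?_neg_natCast _ _ (by norm_num) (by simp)]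
  simp only [List.append_assoc, List.length_append, List.length_cons]
  rw [List.getElem?_append_right (by simp)]
  simp

theorem last_two {st : List String} (h : 2 ≤ st.length) :
    ∃ u a b, st = (u ++ [a]) ++ [b] := by
  rcases st.eq_nil_or_concat with rfl | ⟨w, b, rfl⟩
  · simp at h
  rcases w.eq_nil_or_concat with rfl | ⟨u, a, rfl⟩
  · simp at h
  exact ⟨u, a, b, by simp⟩

theorem chain_last_two {u : List String} {a b : String}
    (h : List.IsChain NoP ((u ++ [a]) ++ [b])) : isP a b = false := by
  have := (List.isChain_append.mp h).2.2
  exact this a (by simp) b rfl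

theorem cropPop_chain (st : List String) (h : List.IsChain NoP st) : cropPop st = st := by
  rw [cropPop, dif_neg]
  rintro ⟨hlen, hcond⟩
  rcases last_two hlen with ⟨u, a, b, rfl⟩
  rw [pyGet_neg_two, PySem.List.pyGet?_neg_one_append_singleton, condA_eq, chain_last_two h] at hcond
  exact Bool.false_ne_true hcond

theorem stepA_eq (st : List String) (t : String) (h : List.IsChain NoP st) :
    cropPop (st ++ [t]) = (push st.reverse t).reverse := by
  rcases st.eq_nil_or_concat with rfl | ⟨u, a, rfl⟩
  · rw [cropPop, dif_neg (by simp)]; rfl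
  · simp only [List.concat_eq_append]
    have hrev : (u ++ [a]).reverse = a :: u.reverse := by simp
    by_cases hp : isP a t = true
    · rw [cropPop, dif_pos ⟨by simp, by
        rw [pyGet_neg_two, PySem.List.pyGet?_neg_one_append_singleton, condA_eq]; exact hp⟩]
      rw [List.dropLast_concat, List.dropLast_concat]
      rw [cropPop_chain u (h.prefix (by simp))]
      rw [hrev]
      simp [push, hp]
    · rw [cropPop, dif_neg ?neg]
      case neg =>
        rintro ⟨_, hcond⟩
        rw [pyGet_neg_two, PySem.List.pyGet?_neg_one_append_singleton, condA_eq] at hcond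
        exact hp hcond
      rw [hrev]
      simp [push, hp]

theorem chain_push (st : List String) (t : String) (h : List.IsChain NoP st) :
    List.IsChain NoP ((push st.reverse t).reverse) := by
  rcases st.eq_nil_or_concat with rfl | ⟨u, a, rfl⟩
  · exact List.isChain_singleton t
  · simp only [List.concat_eq_append] at h ⊢
    have hrev : (u ++ [a]).reverse = a :: u.reverse := by simp
    rw [hrev]
    by_cases hp : isP a t = true
    · simp only [push, hp, if_true, List.reverse_reverse]
      exact h.prefix (by simp)
    · have hpf := eq_false_of_ne_true hp
      have hres : (push (a :: u.reverse) t).reverse = (u ++ [a]) ++ [t] := by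
        simp [push, hpf]
      rw [hres]
      refine List.isChain_append.mpr ⟨h, List.isChain_singleton t, ?_⟩
      intro x hx y hy
      simp only [List.head?_cons, Option.mem_def, Option.some.injEq] at hy
      subst hy
      have hx' : a = x := by simpa using hx
      subst hx'
      simpa [NoP] using eq_false_of_ne_true hp

theorem foldA_eq (l : List String) : ∀ st : List String, List.IsChain NoP st →
    List.foldl (fun s t => cropPop (s ++ [t])) st l = (List.foldl push st.reverse l).reverse := by
  induction l with
  | nil => intro st _; simp
  | cons t l' ih =>
    intro st hst
    simp only [List.foldl_cons]
    rw [stepA_eq st t hst, ih _ (chain_push st t hst), List.reverse_reverse]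


-- ===== VERDICT (by name: the statement is the Claim_ definition above) =====
theorem cropLine_spec : Claim_equal_cropLine := by
  intro line _
  unfold Spec_cropLine cropLine cropLine_alt
  set L := line.toList.map (fun c => String.ofList [c]) with hL
  rw [foldA_eq L [] List.isChain_nil]
  have h2 : List.IsChain NoP (cropLoop L) := pass_fix_chain _ (loop_fix L)
  have h3 : List.foldl push [] (cropLoop L) = (cropLoop L).reverse := by
    rw [chain_fold (cropLoop L) [] h2 (by intro a y _ hy; simp at hy)]
    simp
  have h4 := loop_fold L
  rw [h3] at h4
  simp only [List.reverse_nil]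
  rw [← h4, List.reverse_reverse]
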